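-- pv_equiv track=rewrite | github.com/zcorw/AlignSpeak | apps/api/app/services/tts_service.py | _trim_span
-- ===== SOURCE A (Python) =====
-- def _trim_span(text: str, start: int, end: int) -> tuple[int, int]:
--     cursor_start = max(start, 0)
--     cursor_end = max(end, cursor_start)
--     limit = len(text)
--     cursor_start = min(cursor_start, limit)
--     cursor_end = min(cursor_end, limit)
--     while cursor_start < cursor_end and text[cursor_start].isspace():
--         cursor_start += 1
--     while cursor_end > cursor_start and text[cursor_end - 1].isspace():
--         cursor_end -= 1
--     return cursor_start, cursor_end
-- ===== SOURCE B (Python) =====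
-- def _trim_span(text: str, start: int, end: int) -> tuple[int, int]:
--     cursor_start = max(start, 0)
--     cursor_end = max(end, cursor_start)
--     limit = len(text)
--     cursor_start = min(cursor_start, limit)
--     cursor_end = min(cursor_end, limit)
--     sub = text[cursor_start:cursor_end]
--     stripped_left = sub.lstrip()
--     new_start = cursor_start + (len(sub) - len(stripped_left))
--     stripped = stripped_left.rstrip()
--     return new_start, new_start + len(stripped)
-- ===== Notes on version B (the rewrite author's own statement) =====
-- stated objective: idiomatic
-- what changed: Replaces the two character-by-character whitespace-scanning while loops with a single slice plus str.lstrip()/str.rstrip() and length arithmetic to recover the trimmed indices.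
import Mathlib
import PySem

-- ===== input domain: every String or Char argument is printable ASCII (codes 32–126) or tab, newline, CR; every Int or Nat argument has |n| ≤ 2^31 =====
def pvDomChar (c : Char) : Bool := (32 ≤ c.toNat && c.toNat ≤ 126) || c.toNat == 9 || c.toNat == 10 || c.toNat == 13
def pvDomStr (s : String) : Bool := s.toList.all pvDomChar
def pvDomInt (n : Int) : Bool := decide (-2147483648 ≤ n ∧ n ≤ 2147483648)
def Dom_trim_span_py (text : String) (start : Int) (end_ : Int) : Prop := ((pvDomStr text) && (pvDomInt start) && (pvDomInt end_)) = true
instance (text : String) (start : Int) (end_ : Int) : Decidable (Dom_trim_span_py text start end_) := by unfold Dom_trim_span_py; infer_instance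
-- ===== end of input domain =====

-- B replaces A's two character-by-character whitespace-scanning while loops with a slice
-- plus lstrip/rstrip and length arithmetic; same O(n) cost, return value proved identical.

-- ===== PORT A =====
-- first while loop: advance cursor_start over whitespace (index always in range: cs < ce ≤ len)
def trimLeftA (s : List Char) (cs ce : Nat) : Nat :=
  if h : cs < ce ∧ PySem.Chars.isspace (s.getD cs ' ') = true then
    trimLeftA s (cs + 1) ce
  else cs
termination_by ce - cs
decreasing_by omega

-- second while loop: retreat cursor_end over whitespace
def trimRightA (s : List Char) (cs ce : Nat) : Nat :=
  if h : cs < ce ∧ PySem.Chars.isspace (s.getD (ce - 1) ' ') = true then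
    trimRightA s cs (ce - 1)
  else ce
termination_by ce - cs
decreasing_by omega

def trim_span_py (text : String) (start : Int) (end_ : Int) : Int × Int :=
  let s := text.toList
  let cursor_start0 : Int := max start 0
  let cursor_end0 : Int := max end_ cursor_start0
  let limit : Int := s.length
  let cursor_start1 : Int := min cursor_start0 limit
  let cursor_end1 : Int := min cursor_end0 limit
  let cs := trimLeftA s cursor_start1.toNat cursor_end1.toNat
  let ce := trimRightA s cs cursor_end1.toNat
  ((cs : Int), (ce : Int))

-- ===== PORT B =====
def trim_span_py_alt (text : String) (start : Int) (end_ : Int) : Int × Int :=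
  let s := text.toList
  let cursor_start0 : Int := max start 0
  let cursor_end0 : Int := max end_ cursor_start0
  let limit : Int := s.length
  let cursor_start : Int := min cursor_start0 limit
  let cursor_end : Int := min cursor_end0 limit
  let sub := PySem.List.slice s (some cursor_start) (some cursor_end)
  let stripped_left := PySem.Chars.lstrip sub
  let new_start : Int := cursor_start + ((sub.length : Int) - (stripped_left.length : Int))
  let stripped := PySem.Chars.rstrip stripped_left
  (new_start, new_start + (stripped.length : Int))

-- ===== PRECONDITION & SPEC =====
def Spec_trim_span_py (text : String) (start : Int) (end_ : Int) (out : Int × Int) : Prop := out = trim_span_py_alt text start end_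
instance (text : String) (start : Int) (end_ : Int) (out : Int × Int) : Decidable (Spec_trim_span_py text start end_ out) := by unfold Spec_trim_span_py; infer_instance

-- ===== CLAIM (what is proved, stated in full; the proofs are below) =====
def Claim_equal_trim_span_py : Prop := ∀ (text : String) (start : Int) (end_ : Int), Dom_trim_span_py text start end_ → Spec_trim_span_py text start end_ (trim_span_py text start end_)

-- ===== LEMMAS AND PROOFS =====

lemma rstrip_append_singleton (xs : List Char) (c : Char) :
    PySem.Chars.rstrip (xs ++ [c]) =
      if PySem.Chars.isspace c then PySem.Chars.rstrip xs else xs ++ [c] := by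
  simp only [PySem.Chars.rstrip, List.reverse_append, List.reverse_cons, List.reverse_nil,
    List.nil_append, List.cons_append, List.dropWhile_cons]
  split <;> simp_all

lemma trimLeftA_eq (s : List Char) :
    ∀ (n cs ce : Nat), ce - cs = n → cs ≤ ce → ce ≤ s.length →
      trimLeftA s cs ce = cs + (((s.drop cs).take (ce - cs)).takeWhile PySem.Chars.isspace).length := by
  intro n
  induction n with
  | zero =>
    intro cs ce h hle hce
    have : cs = ce := by omega
    subst this
    rw [trimLeftA]
    simp
  | succ n ih =>
    intro cs ce h hle hce
    have hlt : cs < ce := by omega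
    have hcs : cs < s.length := by omega
    have hget : s.getD cs ' ' = s[cs] := by
      simp [List.getD_eq_getElem?_getD, List.getElem?_eq_getElem hcs]
    have hdrop : s.drop cs = s[cs] :: s.drop (cs + 1) := List.drop_eq_getElem_cons hcs
    have htake : (s.drop cs).take (ce - cs) = s[cs] :: (s.drop (cs + 1)).take (ce - (cs + 1)) := by
      rw [hdrop]
      have : ce - cs = (ce - (cs + 1)) + 1 := by omega
      rw [this, List.take_succ_cons]
    rw [trimLeftA]
    by_cases hsp : PySem.Chars.isspace s[cs] = true
    · rw [dif_pos ⟨hlt, by rw [hget]; exact hsp⟩]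
      rw [ih (cs + 1) ce (by omega) (by omega) hce]
      rw [htake, List.takeWhile_cons_of_pos hsp]
      simp; omega
    · rw [dif_neg (by rw [hget]; tauto)]
      rw [htake, List.takeWhile_cons_of_neg hsp]
      simp
lemma trimRightA_eq (s : List Char) :
    ∀ (n cs ce : Nat), ce - cs = n → cs ≤ ce → ce ≤ s.length →
      trimRightA s cs ce = cs + (PySem.Chars.rstrip ((s.drop cs).take (ce - cs))).length := by
  intro n
  induction n with
  | zero =>
    intro cs ce h hle hce
    have : cs = ce := by omega
    subst this
    rw [trimRightA]
    simp [PySem.Chars.rstrip]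
  | succ n ih =>
    intro cs ce h hle hce
    obtain ⟨e, rfl⟩ : ∃ e, ce = e + 1 := ⟨ce - 1, by omega⟩
    have hlt : cs < e + 1 := by omega
    have hcd : e < s.length := by omega
    have hget : s.getD (e + 1 - 1) ' ' = s[e] := by
      simp [List.getD_eq_getElem?_getD, List.getElem?_eq_getElem hcd]
    have hsimp : e + 1 - 1 = e := rfl
    have hidx : (s.drop cs)[e - cs]? = some s[e] := by
      rw [List.getElem?_drop]
      have he : cs + (e - cs) = e := by omega
      rw [he, List.getElem?_eq_getElem hcd]
    have htake : (s.drop cs).take (e + 1 - cs) = (s.drop cs).take (e - cs) ++ [s[e]] := by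
      have h1 : e + 1 - cs = (e - cs) + 1 := by omega
      rw [h1, List.take_add_one, hidx]
      rfl
    have hlenpre : ((s.drop cs).take (e - cs)).length = e - cs := by
      simp; omega
    rw [trimRightA]
    by_cases hsp : PySem.Chars.isspace s[e] = true
    · rw [dif_pos ⟨hlt, by rw [hget]; exact hsp⟩]
      rw [hsimp, ih cs e (by omega) (by omega) (by omega)]
      rw [htake, rstrip_append_singleton, if_pos hsp]
    · rw [dif_neg (by rw [hget]; tauto)]
      rw [htake, rstrip_append_singleton, if_neg hsp]
      rw [List.length_append, hlenpre]
      simp; omega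

-- dropWhile as drop of the takeWhile length (no named library lemma found for this)
lemma dropWhile_eq_drop_len_takeWhile (p : Char → Bool) (xs : List Char) :
    xs.dropWhile p = xs.drop (xs.takeWhile p).length := by
  induction xs with
  | nil => rfl
  | cons a l ih => by_cases h : p a <;> simp [h, ih]

lemma length_dropWhile_add (p : Char → Bool) (xs : List Char) :
    (xs.takeWhile p).length + (xs.dropWhile p).length = xs.length := by
  rw [← List.length_append, List.takeWhile_append_dropWhile]

-- ===== VERDICT (by name: the statement is the Claim_ definition above) =====
theorem trim_span_py_spec : Claim_equal_trim_span_py := by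
  intro text start end_ _
  unfold Spec_trim_span_py trim_span_py trim_span_py_alt
  dsimp only
  set s := text.toList with hs
  set cs1 : Int := min (max start 0) ((s.length : Int)) with hcs1
  set ce1 : Int := min (max end_ (max start 0)) ((s.length : Int)) with hce1
  have hcs1nn : 0 ≤ cs1 := by rw [hcs1]; exact le_min (le_max_right _ _) (by positivity)
  have hce1nn : cs1 ≤ ce1 := by rw [hcs1, hce1]; simp only [le_min_iff, min_le_iff]; omega
  have hce1le : ce1 ≤ (s.length : Int) := by rw [hce1]; exact min_le_right _ _
  have hcsN : (cs1.toNat : Int) = cs1 := Int.toNat_of_nonneg hcs1nn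
  have hceN : (ce1.toNat : Int) = ce1 := Int.toNat_of_nonneg (le_trans hcs1nn hce1nn)
  have hcsle : cs1.toNat ≤ ce1.toNat := by omega
  have hcele : ce1.toNat ≤ s.length := by omega
  -- the slice in B is drop-then-take with the clamped Nat bounds
  have hslice : PySem.List.slice s (some cs1) (some ce1) =
      (s.drop cs1.toNat).take (ce1.toNat - cs1.toNat) := by
    simp only [PySem.List.slice, PySem.List.clampIdx]
    rw [if_neg (by omega), if_neg (by omega),
      min_eq_left (by omega : cs1.toNat ≤ s.length), min_eq_left (by omega : ce1.toNat ≤ s.length)]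
  rw [hslice]
  set sub := (s.drop cs1.toNat).take (ce1.toNat - cs1.toNat) with hsub
  have hsublen : sub.length = ce1.toNat - cs1.toNat := by
    rw [hsub, List.length_take, List.length_drop]
    omega
  set k := (sub.takeWhile PySem.Chars.isspace).length with hk
  have hkle : k ≤ sub.length := by
    have := length_dropWhile_add PySem.Chars.isspace sub
    omega
  have hlstrip : PySem.Chars.lstrip sub = (s.drop (cs1.toNat + k)).take (ce1.toNat - (cs1.toNat + k)) := by
    have h1 : PySem.Chars.lstrip sub = sub.drop k := by
      rw [PySem.Chars.lstrip, hk, dropWhile_eq_drop_len_takeWhile]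
    rw [h1, hsub, List.drop_take, List.drop_drop]
    congr 1
    omega
  have hlstriplen : (PySem.Chars.lstrip sub).length = sub.length - k := by
    have := length_dropWhile_add PySem.Chars.isspace sub
    rw [PySem.Chars.lstrip]
    omega
  -- left cursor agreement
  have hleft : trimLeftA s cs1.toNat ce1.toNat = cs1.toNat + k := by
    rw [trimLeftA_eq s (ce1.toNat - cs1.toNat) cs1.toNat ce1.toNat rfl hcsle hcele]
  -- right cursor agreement
  have hright : trimRightA s (cs1.toNat + k) ce1.toNat =
      (cs1.toNat + k) + (PySem.Chars.rstrip (PySem.Chars.lstrip sub)).length := by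
    rw [trimRightA_eq s (ce1.toNat - (cs1.toNat + k)) (cs1.toNat + k) ce1.toNat rfl (by omega) hcele]
    rw [hlstrip]
  rw [hleft, hright, Prod.mk.injEq]
  constructor
  · rw [hsublen, hlstriplen]
    push_cast
    omega
  · rw [hsublen, hlstriplen]
    push_cast
    omega
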